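-- pv_equiv track=rewrite | github.com/daniel-reich/ubiquitous-fiesta | hzs9hZXpgYdGM3iwB_17.py | alternating_caps
-- ===== SOURCE A (Python) =====
-- import itertools as it
--
-- def alternating_caps(txt):
--   t   = txt.replace(' ', '')
--   alt = [
--     l for z in it.zip_longest(
--       t[::2].upper(), t[1::2].lower(), fillvalue=''
--     ) for l in z
--   ]
--   return ''.join(c if c == ' ' else alt.pop(0) for c in txt)
-- ===== SOURCE B (Python) =====
-- def alternating_caps(txt):
--     out = []
--     k = 0
--     for c in txt:
--         if c == ' ':
--             out.append(c)
--         else: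
--             out.append(c.upper() if k % 2 == 0 else c.lower())
--             k += 1
--     return ''.join(out)
-- ===== Notes on version B (the rewrite author's own statement) =====
-- stated objective: faster
-- what changed: Single pass with a parity counter of non-space characters, instead of stripping spaces, building an interleaved upper/lower list via zip_longest and repeatedly popping its front while re-scanning the original.
import Mathlib
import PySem

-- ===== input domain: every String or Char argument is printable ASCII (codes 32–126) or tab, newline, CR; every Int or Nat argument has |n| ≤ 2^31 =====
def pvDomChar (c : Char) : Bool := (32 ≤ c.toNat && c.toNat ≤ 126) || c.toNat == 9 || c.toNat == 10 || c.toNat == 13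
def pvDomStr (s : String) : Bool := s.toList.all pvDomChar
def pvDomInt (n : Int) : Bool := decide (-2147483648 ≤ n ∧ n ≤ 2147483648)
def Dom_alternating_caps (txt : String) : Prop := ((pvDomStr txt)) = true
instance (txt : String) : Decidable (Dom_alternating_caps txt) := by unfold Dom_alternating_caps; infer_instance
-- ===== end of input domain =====

-- B replaces A's strip/zip_longest/interleave/pop(0) pipeline by one pass with a parity counter (measured faster: A's pop(0) is quadratic).

-- ===== PORT A =====
-- itertools.zip_longest(xs, ys, fillvalue='') flattened by the comprehension: the two
-- 1-char strings of each pair in order, '' filling the shorter side (exact, ported by hand).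
def pvZipLongestFlat : List Char → List Char → List String
  | [], [] => []
  | a :: as, [] => String.ofList [a] :: "" :: pvZipLongestFlat as []
  | [], b :: bs => "" :: String.ofList [b] :: pvZipLongestFlat [] bs
  | a :: as, b :: bs => String.ofList [a] :: String.ofList [b] :: pvZipLongestFlat as bs

-- the generator ''.join(c if c == ' ' else alt.pop(0) for c in txt); alt.pop(0) on an
-- exhausted alt would raise IndexError, which never happens here (alt carries at least one
-- entry per non-space char of txt), so the headD default is never used.
def pvJoinPieces : List Char → List String → List String
  | [], _ => []
  | c :: cs, alt =>
      if c = ' ' then String.ofList [c] :: pvJoinPieces cs alt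
      else alt.headD "" :: pvJoinPieces cs alt.tail

def alternating_caps (txt : String) : String :=
  let t := (PySem.Str.replace txt " " "").toList
  let evens := (PySem.List.slice? t none none 2).getD []       -- t[::2] (step 2 ≠ 0, so some)
  let odds  := (PySem.List.slice? t (some 1) none 2).getD []   -- t[1::2]
  let alt := pvZipLongestFlat (PySem.Chars.upper evens) (PySem.Chars.lower odds)
  PySem.Str.join "" (pvJoinPieces txt.toList alt)

-- ===== PORT B =====
-- c.upper()/c.lower() on a 1-char string: PySem.Chars.upperChar/lowerChar (exact on ASCII)
def alternating_caps_alt (txt : String) : String :=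
  let st := txt.toList.foldl
    (fun (st : List String × Nat) c =>
      if c = ' ' then (st.1 ++ [String.ofList [c]], st.2)
      else (st.1 ++ [String.ofList [if st.2 % 2 == 0 then PySem.Chars.upperChar c
                                    else PySem.Chars.lowerChar c]],
            st.2 + 1))
    ([], 0)
  PySem.Str.join "" st.1

-- ===== PRECONDITION & SPEC =====
def Spec_alternating_caps (txt : String) (out : String) : Prop := out = alternating_caps_alt txt
instance (txt : String) (out : String) : Decidable (Spec_alternating_caps txt out) := by unfold Spec_alternating_caps; infer_instance

-- ===== CLAIM (what is proved, stated in full; the proofs are below) =====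
def Claim_equal_alternating_caps : Prop := ∀ (txt : String), Dom_alternating_caps txt → Spec_alternating_caps txt (alternating_caps txt)

-- ===== LEMMAS AND PROOFS =====

-- every second element, starting at the head (= t[::2])
def everyOther {α : Type} : List α → List α
  | [] => []
  | [a] => [a]
  | a :: _ :: rest => a :: everyOther rest

-- B's loop as structural recursion (the foldl's list of appended pieces)
def bRec : List Char → Nat → List String
  | [], _ => []
  | c :: cs, k =>
      if c = ' ' then String.ofList [c] :: bRec cs k
      else String.ofList [if k % 2 == 0 then PySem.Chars.upperChar c
                          else PySem.Chars.lowerChar c] :: bRec cs (k + 1)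

lemma replace_go_filter (fuel : Nat) :
    ∀ (l acc : List Char), l.length ≤ fuel →
      PySem.Chars.replace.go [' '] [] fuel l acc = acc.reverse ++ l.filter (· ≠ ' ') := by
  induction fuel with
  | zero =>
      intro l acc h
      have : l = [] := by cases l <;> simp_all
      subst this
      simp [PySem.Chars.replace.go]
  | succ n ih =>
      intro l acc h
      cases l with
      | nil => simp [PySem.Chars.replace.go]
      | cons c t =>
          by_cases hc : c = ' '
          · subst hc
            rw [show PySem.Chars.replace.go [' '] [] (n+1) (' ' :: t) acc
                  = PySem.Chars.replace.go [' '] [] n t acc from by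
                simp [PySem.Chars.replace.go, List.isPrefixOf]]
            rw [ih t acc (by simpa using h)]
            simp
          · rw [show PySem.Chars.replace.go [' '] [] (n+1) (c :: t) acc
                  = PySem.Chars.replace.go [' '] [] n t (c :: acc) from by
                have hc' : ¬(' ' = c) := fun h => hc h.symm
                simp [PySem.Chars.replace.go, List.isPrefixOf, hc']]
            rw [ih t (c :: acc) (by simpa using h)]
            simp [hc]

lemma replace_filter (cs : List Char) :
    PySem.Chars.replace cs [' '] [] = cs.filter (· ≠ ' ') := by
  rw [PySem.Chars.replace]
  simp [replace_go_filter cs.length cs [] le_rfl]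

lemma filterMap_every {α : Type} (xs : List α) :
    (List.range ((xs.length + 1) / 2)).filterMap (fun k => xs[2 * k]?) = everyOther xs := by
  induction xs using everyOther.induct with
  | case1 => simp [everyOther]
  | case2 a => simp [everyOther, List.range_succ]
  | case3 a b rest ih =>
      have hlen : ((a :: b :: rest).length + 1) / 2 = (rest.length + 1) / 2 + 1 := by
        simp; omega
      rw [hlen, List.range_succ_eq_map]
      simp only [List.filterMap_cons, List.filterMap_map]
      have hidx : ∀ k : Nat, (a :: b :: rest)[2 * (k + 1)]? = rest[2 * k]? := by
        intro k
        rw [show 2 * (k + 1) = 2 * k + 1 + 1 from by ring]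
        simp
      simp only [Function.comp_def, hidx]
      simp [everyOther, ← ih]

lemma slice2_none {α : Type} (xs : List α) :
    PySem.List.slice? xs none none 2 = some (everyOther xs) := by
  rw [PySem.List.slice?]
  simp only [PySem.List.sliceIndices]
  norm_num
  rw [show (if 0 < xs.length then (((xs.length : Int) + 2 - 1) / 2).toNat else 0)
        = (xs.length + 1) / 2 from by split <;> omega]
  rw [← filterMap_every xs]
  apply List.filterMap_congr
  intro x _
  congr 1

lemma slice2_one {α : Type} (xs : List α) :
    PySem.List.slice? xs (some 1) none 2 = some (everyOther xs.tail) := by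
  rw [PySem.List.slice?]
  simp only [PySem.List.sliceIndices]
  norm_num
  cases xs with
  | nil => simp [everyOther]
  | cons a t =>
      rw [show (if 1 < (a :: t).length
            then ((((a :: t).length : Int) - min 1 ((a :: t).length : Int) + 2 - 1) / 2).toNat
            else 0) = (t.length + 1) / 2 from by simp; split <;> omega]
      rw [show (a :: t).tail = t from rfl, ← filterMap_every t]
      apply List.filterMap_congr
      intro x _
      rw [show (min 1 ((a :: t).length : Int) + 2 * (x : Int)).toNat = 2 * x + 1 from by
            simp; omega]
      simp

-- the alternately-cased pieces of the non-space characters, starting at counter k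
def fAlt : List Char → Nat → List String
  | [], _ => []
  | c :: cs, k =>
      String.ofList [if k % 2 == 0 then PySem.Chars.upperChar c
                     else PySem.Chars.lowerChar c] :: fAlt cs (k + 1)
lemma fAlt_two (cs : List Char) : ∀ k, fAlt cs (k + 2) = fAlt cs k := by
  induction cs with
  | nil => intro k; simp [fAlt]
  | cons c cs ih =>
      intro k
      simp only [fAlt, Nat.add_mod_right, show k + 2 + 1 = (k + 1) + 2 from by ring, ih]
lemma everyOther_cons {α : Type} (b : α) (rest : List α) :
    everyOther (b :: rest) = b :: everyOther rest.tail := by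
  cases rest <;> simp [everyOther]
lemma zipflat (t : List Char) :
    pvZipLongestFlat ((everyOther t).map PySem.Chars.upperChar)
        ((everyOther t.tail).map PySem.Chars.lowerChar)
      = fAlt t 0 ++ (if t.length % 2 = 1 then [""] else []) := by
  induction t using everyOther.induct with
  | case1 => simp [everyOther, pvZipLongestFlat, fAlt]
  | case2 a => simp [everyOther, pvZipLongestFlat, fAlt]
  | case3 a b rest ih =>
      have h2 : fAlt rest 2 = fAlt rest 0 := fAlt_two rest 0
      have hlen : (a :: b :: rest).length % 2 = rest.length % 2 := by simp; omega
      simp only [everyOther, List.tail_cons, everyOther_cons, List.map_cons, pvZipLongestFlat,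
        fAlt, hlen]
      norm_num [h2, ih]
lemma pieces_eq : ∀ (cs : List Char) (k : Nat) (rest : List String),
    pvJoinPieces cs (fAlt (cs.filter (· ≠ ' ')) k ++ rest) = bRec cs k := by
  intro cs
  induction cs with
  | nil => intro k rest; simp [pvJoinPieces, bRec]
  | cons c cs ih =>
      intro k rest
      by_cases hc : c = ' '
      · subst hc
        have hf : List.filter (fun x => decide (x ≠ ' ')) (' ' :: cs)
            = List.filter (fun x => decide (x ≠ ' ')) cs := by simp
        simp only [hf, pvJoinPieces, bRec]
        simp only [ite_true]
        rw [ih k rest]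
      · have hf : List.filter (fun x => decide (x ≠ ' ')) (c :: cs)
            = c :: List.filter (fun x => decide (x ≠ ' ')) cs := by simp [hc]
        simp only [hf, fAlt, pvJoinPieces, bRec]
        rw [if_neg hc, if_neg hc]
        simp only [List.cons_append, List.headD_cons, List.tail_cons]
        rw [ih (k + 1) rest]
lemma foldB (cs : List Char) : ∀ (out : List String) (k : Nat),
    cs.foldl
      (fun (st : List String × Nat) c =>
        if c = ' ' then (st.1 ++ [String.ofList [c]], st.2)
        else (st.1 ++ [String.ofList [if st.2 % 2 == 0 then PySem.Chars.upperChar c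
                                      else PySem.Chars.lowerChar c]],
              st.2 + 1))
      (out, k)
    = (out ++ bRec cs k, k + (cs.filter (· ≠ ' ')).length) := by
  induction cs with
  | nil => intro out k; simp [bRec]
  | cons c cs ih =>
      intro out k
      by_cases hc : c = ' '
      · subst hc
        simp only [List.foldl_cons, ite_true]
        rw [ih (out ++ [String.ofList [' ']]) k]
        simp [bRec]
      · simp only [List.foldl_cons, if_neg hc]
        rw [ih (out ++ [String.ofList [if k % 2 == 0 then PySem.Chars.upperChar c
              else PySem.Chars.lowerChar c]]) (k + 1)]
        simp [bRec, hc, Nat.add_comm, Nat.add_assoc]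

-- ===== VERDICT (by name: the statement is the Claim_ definition above) =====
theorem alternating_caps_spec : Claim_equal_alternating_caps := by
  intro txt _
  unfold Spec_alternating_caps alternating_caps alternating_caps_alt
  simp only [PySem.Str.replace, String.toList_ofList, slice2_none, slice2_one,
    Option.getD_some, PySem.Chars.upper, PySem.Chars.lower, foldB]
  rw [show ((" " : String).toList) = [' '] from rfl, show (("" : String).toList) = [] from rfl]
  rw [replace_filter, zipflat]
  rw [pieces_eq txt.toList 0 _]
  simp
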